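-- pv_equiv track=rewrite | github.com/HPC2H2/FoodVsRats-CardEnhanceModel | generate_combinations.py | generate_combinations
-- ===== SOURCE A (Python) =====
-- def generate_combinations(dim=2, max_total=3, exclude_zero=True):
--     """生成所有可能的卡牌组合，其中各维度的和不超过max_total
--
--     Args:
--         dim: 维度 (2或3)
--         max_total: 卡牌总数上限
--         exclude_zero: 是否排除全零的组合
--
--     Returns:
--         卡牌类型列表的列表，例如：
--         dim=2时: [['same', 'down1'], ['same', 'same', 'down1'], ...]
--         dim=3时: [['same', 'down1', 'down2'], ['same', 'same', 'down1'], ...]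
--         其中'same'会排在'down1'前面，'down1'会排在'down2'前面。
--     """
--     if dim not in (2, 3):
--         raise ValueError("dim 必须是 2 或 3")
--
--     card_combinations = []
--     def is_valid_combination(*values):
--         return (sum(values) <= max_total and
--                 not (exclude_zero and all(v == 0 for v in values)))
--
--     if dim == 2:
--         for same_star in range(max_total + 1):  # 同星级卡数量
--             for down1_star in range(max_total + 1):  # 低一星卡数量
--                 if is_valid_combination(same_star, down1_star):
--                     # 转换为卡牌类型列表
--                     cards = ['same'] * same_star + ['down1'] * down1_star
--                     card_combinations.append(cards)
--     else:  # dim == 3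
--         for same_star in range(max_total + 1):  # 同星级卡数量
--             for down1_star in range(max_total + 1):  # 低一星卡数量
--                 for down2_star in range(max_total + 1):  # 低二星卡数量
--                     if is_valid_combination(same_star, down1_star, down2_star):
--                         # 转换为卡牌类型列表
--                         cards = (['same'] * same_star +
--                                 ['down1'] * down1_star +
--                                 ['down2'] * down2_star)
--                         card_combinations.append(cards)
--
--     return card_combinations
-- ===== SOURCE B (Python) =====
-- def generate_combinations(dim=2, max_total=3, exclude_zero=True):
--     """Same results as the original, but via one recursive builder over the
--     card-type list instead of two hardcoded nested-loop blocks."""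
--     if dim not in (2, 3):
--         raise ValueError("dim 必须是 2 或 3")
--     cards = ['same', 'down1', 'down2'][:dim]
--
--     def build(kinds, prefix, budget):
--         if not kinds:
--             return [] if (exclude_zero and not prefix) else [prefix]
--         result = []
--         for count in range(budget + 1):
--             result += build(kinds[1:], prefix + [kinds[0]] * count, budget - count)
--         return result
--
--     return build(cards, [], max_total)
-- ===== Notes on version B (the rewrite author's own statement) =====
-- stated objective: simpler
-- what changed: Replaces A's two hardcoded dim-specific nested-loop blocks (with an after-the-fact sum filter over full ranges) by one budget-passing recursive builder over the card-type list, so each count only ranges over the remaining budget and both dims share one code path.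
import Mathlib
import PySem

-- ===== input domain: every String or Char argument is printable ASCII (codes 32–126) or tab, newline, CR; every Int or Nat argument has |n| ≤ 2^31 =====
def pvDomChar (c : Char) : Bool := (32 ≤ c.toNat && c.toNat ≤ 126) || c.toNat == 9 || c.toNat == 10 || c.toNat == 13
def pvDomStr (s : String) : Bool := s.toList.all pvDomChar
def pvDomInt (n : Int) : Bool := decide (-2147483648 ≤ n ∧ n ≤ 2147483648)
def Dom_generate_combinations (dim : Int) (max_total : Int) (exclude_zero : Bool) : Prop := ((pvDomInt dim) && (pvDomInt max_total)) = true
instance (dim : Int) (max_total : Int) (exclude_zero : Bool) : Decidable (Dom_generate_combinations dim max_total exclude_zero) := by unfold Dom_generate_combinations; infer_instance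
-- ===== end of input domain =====

-- B replaces A's two hardcoded dim-specific nested-loop blocks by one recursive
-- builder over the card-type list (objective: simpler, one code path for both dims).

-- ===== PORT A =====
-- is_valid_combination(*values)
def pvIsValid (max_total : Int) (exclude_zero : Bool) (values : List Int) : Bool :=
  decide (values.sum ≤ max_total) && !(exclude_zero && values.all (fun v => v == 0))

def generate_combinations (dim : Int) (max_total : Int) (exclude_zero : Bool) : List (List String) :=
  if dim ≠ 2 ∧ dim ≠ 3 then []  -- Python raises ValueError here; excluded by Pre_
  else if dim = 2 then
    (PySem.List.pyRange 0 (max_total + 1) 1).foldl (fun acc same_star =>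
      (PySem.List.pyRange 0 (max_total + 1) 1).foldl (fun acc down1_star =>
        if pvIsValid max_total exclude_zero [same_star, down1_star] then
          acc ++ [List.replicate same_star.toNat "same" ++ List.replicate down1_star.toNat "down1"]
        else acc) acc) []
  else
    (PySem.List.pyRange 0 (max_total + 1) 1).foldl (fun acc same_star =>
      (PySem.List.pyRange 0 (max_total + 1) 1).foldl (fun acc down1_star =>
        (PySem.List.pyRange 0 (max_total + 1) 1).foldl (fun acc down2_star =>
          if pvIsValid max_total exclude_zero [same_star, down1_star, down2_star] then
            acc ++ [List.replicate same_star.toNat "same" ++ List.replicate down1_star.toNat "down1"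
                      ++ List.replicate down2_star.toNat "down2"]
          else acc) acc) acc) []

-- ===== PORT B =====
-- build(kinds, prefix, budget)
def pvBuild (exclude_zero : Bool) : List String → List String → Int → List (List String)
  | [], pref, _ => if exclude_zero && pref.isEmpty then [] else [pref]
  | k :: rest, pref, budget =>
      (PySem.List.pyRange 0 (budget + 1) 1).foldl
        (fun res count =>
          res ++ pvBuild exclude_zero rest (pref ++ List.replicate count.toNat k) (budget - count)) []

def generate_combinations_alt (dim : Int) (max_total : Int) (exclude_zero : Bool) : List (List String) :=
  if dim ≠ 2 ∧ dim ≠ 3 then []  -- Python raises ValueError here; excluded by Pre_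
  else pvBuild exclude_zero (List.take dim.toNat ["same", "down1", "down2"]) [] max_total

-- ===== PRECONDITION & SPEC =====
-- Pre_ excludes exactly the inputs where A raises ValueError (dim not in (2, 3)).
def Pre_generate_combinations (dim : Int) (max_total : Int) (exclude_zero : Bool) : Prop :=
  dim = 2 ∨ dim = 3
instance (dim : Int) (max_total : Int) (exclude_zero : Bool) : Decidable (Pre_generate_combinations dim max_total exclude_zero) := by unfold Pre_generate_combinations; infer_instance
def pvWitness_generate_combinations : Int × Int × Bool := (2, 3, true)

def Spec_generate_combinations (dim : Int) (max_total : Int) (exclude_zero : Bool) (out : List (List String)) : Prop := out = generate_combinations_alt dim max_total exclude_zero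
instance (dim : Int) (max_total : Int) (exclude_zero : Bool) (out : List (List String)) : Decidable (Spec_generate_combinations dim max_total exclude_zero out) := by unfold Spec_generate_combinations; infer_instance

-- ===== CLAIM (what is proved, stated in full; the proofs are below) =====
def Claim_equal_generate_combinations : Prop := ∀ (dim : Int) (max_total : Int) (exclude_zero : Bool), Dom_generate_combinations dim max_total exclude_zero → Pre_generate_combinations dim max_total exclude_zero → Spec_generate_combinations dim max_total exclude_zero (generate_combinations dim max_total exclude_zero)

-- ===== LEMMAS AND PROOFS =====

theorem flatMap_ite_nil {α : Type} (l : List Int) (q : Int → Bool) (f : Int → α) :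
    l.flatMap (fun x => if q x then [] else [f x])
      = (l.filter (fun x => !q x)).map f := by
  induction l with
  | nil => rfl
  | cons x t ih =>
      simp only [List.flatMap_cons, List.filter_cons, ih]
      cases h : q x <;> simp

theorem filter_range_le (b m : Int) (h0 : 0 ≤ b) (hb : b ≤ m) (q : Int → Bool) :
    (PySem.List.pyRange 0 (m + 1) 1).filter (fun d => decide (d ≤ b) && q d)
      = (PySem.List.pyRange 0 (b + 1) 1).filter q := by
  rw [PySem.List.pyRange_one_append 0 (b + 1) (m + 1) (by omega) (by omega), List.filter_append]
  have h1 : (PySem.List.pyRange (b + 1) (m + 1) 1).filter (fun d => decide (d ≤ b) && q d) = [] := by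
    rw [List.filter_eq_nil_iff]
    intro d hd
    have := (PySem.List.mem_pyRange_one).mp hd
    simp [decide_eq_false (by omega : ¬ d ≤ b)]
  rw [h1, List.append_nil]
  apply List.filter_congr
  intro d hd
  have := (PySem.List.mem_pyRange_one).mp hd
  simp [decide_eq_true (by omega : d ≤ b)]

theorem flatMap_range_le {α : Type} (b m : Int) (h0 : 0 ≤ b) (hb : b ≤ m) (g : Int → List α)
    (hg : ∀ d, 0 ≤ d → b < d → g d = []) :
    (PySem.List.pyRange 0 (m + 1) 1).flatMap g
      = (PySem.List.pyRange 0 (b + 1) 1).flatMap g := by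
  rw [PySem.List.pyRange_one_append 0 (b + 1) (m + 1) (by omega) (by omega), List.flatMap_append]
  have h1 : (PySem.List.pyRange (b + 1) (m + 1) 1).flatMap g = [] := by
    rw [List.flatMap_eq_nil_iff]
    intro d hd
    have := (PySem.List.mem_pyRange_one).mp hd
    exact hg d (by omega) (by omega)
  rw [h1, List.append_nil]

theorem pvValid2_eq (mt s d : Int) (ez : Bool) (hs0 : 0 ≤ s) (hd0 : 0 ≤ d) :
    pvIsValid mt ez [s, d]
      = (decide (d ≤ mt - s) &&
          !(ez && ((List.replicate s.toNat "same" ++ List.replicate d.toNat "down1").isEmpty))) := by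
  simp only [pvIsValid, List.sum_cons, List.sum_nil, add_zero, List.all_cons, List.all_nil,
    Bool.and_true]
  cases ez <;> simp only [Bool.false_and, Bool.not_false, Bool.and_true, Bool.true_and] <;>
    [skip; apply Bool.eq_iff_iff.mpr] <;>
    simp [List.append_eq_nil_iff, List.replicate_eq_nil_iff, Int.toNat_eq_zero] <;>
    omega

theorem pvValid3_eq (mt s d1 d2 : Int) (ez : Bool) (hs0 : 0 ≤ s) (h10 : 0 ≤ d1) (h20 : 0 ≤ d2) :
    pvIsValid mt ez [s, d1, d2]
      = (decide (d2 ≤ mt - s - d1) &&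
          !(ez && ((List.replicate s.toNat "same" ++ (List.replicate d1.toNat "down1"
              ++ List.replicate d2.toNat "down2")).isEmpty))) := by
  simp only [pvIsValid, List.sum_cons, List.sum_nil, add_zero, List.all_cons, List.all_nil,
    Bool.and_true]
  cases ez <;> simp only [Bool.false_and, Bool.not_false, Bool.and_true, Bool.true_and] <;>
    [skip; apply Bool.eq_iff_iff.mpr] <;>
    simp [List.append_eq_nil_iff, List.replicate_eq_nil_iff, Int.toNat_eq_zero] <;>
    omega

theorem gen2_core (mt : Int) (ez : Bool) :
    ((PySem.List.pyRange 0 (mt + 1) 1).foldl (fun acc same_star =>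
      (PySem.List.pyRange 0 (mt + 1) 1).foldl (fun acc down1_star =>
        if pvIsValid mt ez [same_star, down1_star] then
          acc ++ [List.replicate same_star.toNat "same" ++ List.replicate down1_star.toNat "down1"]
        else acc) acc) [])
    = pvBuild ez ["same", "down1"] [] mt := by
  simp only [PySem.List.foldl_append_if, PySem.List.foldl_append_eq_flatMap, List.nil_append,
    pvBuild, List.nil_append]
  apply List.flatMap_congr
  intro s hs
  have hsb := (PySem.List.mem_pyRange_one).mp hs
  rw [flatMap_ite_nil, List.filter_congr (fun d hd =>
    pvValid2_eq mt s d ez (by omega) (((PySem.List.mem_pyRange_one).mp hd).1))]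
  rw [filter_range_le (mt - s) mt (by omega) (by omega)]

theorem gen3_core (mt : Int) (ez : Bool) :
    ((PySem.List.pyRange 0 (mt + 1) 1).foldl (fun acc same_star =>
      (PySem.List.pyRange 0 (mt + 1) 1).foldl (fun acc down1_star =>
        (PySem.List.pyRange 0 (mt + 1) 1).foldl (fun acc down2_star =>
          if pvIsValid mt ez [same_star, down1_star, down2_star] then
            acc ++ [List.replicate same_star.toNat "same" ++ (List.replicate down1_star.toNat "down1"
                      ++ List.replicate down2_star.toNat "down2")]
          else acc) acc) acc) [])
    = pvBuild ez ["same", "down1", "down2"] [] mt := by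
  simp only [PySem.List.foldl_append_if, PySem.List.foldl_append_eq_flatMap, List.nil_append,
    pvBuild, List.nil_append, List.append_assoc]
  apply List.flatMap_congr
  intro s hs
  have hsb := (PySem.List.mem_pyRange_one).mp hs
  rw [flatMap_range_le (mt - s) mt (by omega) (by omega) _ (fun d1 hd10 hd1 => by
    rw [List.filter_eq_nil_iff.mpr, List.map_nil]
    intro d2 hd2
    have h2 := (PySem.List.mem_pyRange_one).mp hd2
    simp only [pvIsValid, List.sum_cons, List.sum_nil, add_zero, List.all_cons, List.all_nil]
    simp [decide_eq_false (by omega : ¬ s + (d1 + d2) ≤ mt)])]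
  apply List.flatMap_congr
  intro d1 hd1
  have h1b := (PySem.List.mem_pyRange_one).mp hd1
  rw [flatMap_ite_nil, List.filter_congr (fun d2 hd2 =>
    pvValid3_eq mt s d1 d2 ez (by omega) (by omega) (((PySem.List.mem_pyRange_one).mp hd2).1))]
  rw [filter_range_le (mt - s - d1) mt (by omega) (by omega)]


theorem dim2_eq (mt : Int) (ez : Bool) :
    generate_combinations 2 mt ez = generate_combinations_alt 2 mt ez := by
  show _ = generate_combinations_alt 2 mt ez
  unfold generate_combinations generate_combinations_alt
  norm_num
  exact gen2_core mt ez

theorem dim3_eq (mt : Int) (ez : Bool) :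
    generate_combinations 3 mt ez = generate_combinations_alt 3 mt ez := by
  unfold generate_combinations generate_combinations_alt
  norm_num
  exact gen3_core mt ez

-- ===== VERDICT (by name: the statement is the Claim_ definition above) =====
theorem generate_combinations_spec : Claim_equal_generate_combinations := by
  intro dim mt ez _ hpre
  unfold Spec_generate_combinations
  rcases hpre with h | h <;> subst h
  · exact dim2_eq mt ez
  · exact dim3_eq mt ez
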